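-- pv_equiv track=rewrite | github.com/jasonjiao2024/tsle-sleep-simulation | analysis/slpdb_processing.py | select_eeg_channel
-- ===== SOURCE A (Python) =====
-- from typing import Iterable, List, Optional
--
-- EEG_HINTS = ("EEG", "C3", "C4", "O1", "O2", "CZ", "FP")
--
-- def select_eeg_channel(sig_names: Iterable[str]) -> int:
--     names = list(sig_names)
--     for idx, name in enumerate(names):
--         if "EEG" in name.upper():
--             return idx
--     for idx, name in enumerate(names):
--         upper = name.upper()
--         if any(hint in upper for hint in EEG_HINTS):
--             return idx
--     return 0
-- ===== SOURCE B (Python) =====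
-- from typing import Iterable
--
-- EEG_HINTS = ("EEG", "C3", "C4", "O1", "O2", "CZ", "FP")
--
-- def select_eeg_channel(sig_names: Iterable[str]) -> int:
--     first_hint = None
--     for idx, name in enumerate(sig_names):
--         upper = name.upper()
--         if "EEG" in upper:
--             return idx
--         if first_hint is None and any(hint in upper for hint in EEG_HINTS):
--             first_hint = idx
--     return first_hint if first_hint is not None else 0
-- ===== Notes on version B (the rewrite author's own statement) =====
-- stated objective: alternative
-- what changed: Replaces A's two sequential scans over the list with a single pass that returns immediately on an 'EEG' match and records the first hint match in an accumulator, resolved after the loop.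
import Mathlib
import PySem

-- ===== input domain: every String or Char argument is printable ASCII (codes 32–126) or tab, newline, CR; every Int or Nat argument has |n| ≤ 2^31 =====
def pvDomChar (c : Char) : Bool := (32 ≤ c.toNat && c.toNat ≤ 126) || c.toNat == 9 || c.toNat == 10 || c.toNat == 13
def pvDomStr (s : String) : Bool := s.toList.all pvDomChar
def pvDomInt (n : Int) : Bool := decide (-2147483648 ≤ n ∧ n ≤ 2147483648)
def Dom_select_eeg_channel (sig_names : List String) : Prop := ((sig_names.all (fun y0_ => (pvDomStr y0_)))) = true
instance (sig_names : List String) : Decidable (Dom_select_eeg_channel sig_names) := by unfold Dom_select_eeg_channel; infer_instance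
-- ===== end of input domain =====

-- B folds A's two sequential scans into a single pass with a first-hint accumulator (alternative decomposition, same cost).


-- ===== PORT A =====
def EEG_HINTS : List String := ["EEG", "C3", "C4", "O1", "O2", "CZ", "FP"]

-- first loop of A: first index whose upper-cased name contains "EEG"
def pvScan1 : List String → Int → Option Int
  | [], _ => none
  | name :: rest, idx =>
    if PySem.Str.isIn "EEG" (PySem.Str.upper name) then some idx
    else pvScan1 rest (idx + 1)

-- second loop of A: first index whose upper-cased name contains any hint
def pvScan2 : List String → Int → Option Int
  | [], _ => none
  | name :: rest, idx =>
    if EEG_HINTS.any (fun hint => PySem.Str.isIn hint (PySem.Str.upper name)) then some idx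
    else pvScan2 rest (idx + 1)

def select_eeg_channel (sig_names : List String) : Int :=
  match pvScan1 sig_names 0 with
  | some i => i
  | none =>
    match pvScan2 sig_names 0 with
    | some i => i
    | none => 0

-- ===== PORT B =====
-- single pass of B: return on an "EEG" match, record the first hint in first_hint
def pvGoB : List String → Int → Option Int → Int
  | [], _, firstHint => firstHint.getD 0
  | name :: rest, idx, firstHint =>
    let upper := PySem.Str.upper name
    if PySem.Str.isIn "EEG" upper then idx
    else
      pvGoB rest (idx + 1)
        (if firstHint.isNone && EEG_HINTS.any (fun hint => PySem.Str.isIn hint upper)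
         then some idx else firstHint)

def select_eeg_channel_alt (sig_names : List String) : Int :=
  pvGoB sig_names 0 none

-- ===== PRECONDITION & SPEC =====
def Spec_select_eeg_channel (sig_names : List String) (out : Int) : Prop := out = select_eeg_channel_alt sig_names
instance (sig_names : List String) (out : Int) : Decidable (Spec_select_eeg_channel sig_names out) := by unfold Spec_select_eeg_channel; infer_instance

-- ===== CLAIM (what is proved, stated in full; the proofs are below) =====
def Claim_equal_select_eeg_channel : Prop := ∀ (sig_names : List String), Dom_select_eeg_channel sig_names → Spec_select_eeg_channel sig_names (select_eeg_channel sig_names)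

-- ===== LEMMAS AND PROOFS =====

-- B's single pass equals: scan1's answer, else the pending first hint, else scan2's answer, else 0.
theorem pvGoB_eq (l : List String) : ∀ (idx : Int) (fh : Option Int),
    pvGoB l idx fh =
      match pvScan1 l idx with
      | some i => i
      | none =>
        match fh with
        | some j => j
        | none => match pvScan2 l idx with | some i => i | none => 0 := by
  induction l with
  | nil => intro idx fh; cases fh <;> simp [pvGoB, pvScan1, pvScan2]
  | cons name rest ih =>
    intro idx fh
    simp only [pvGoB, pvScan1, pvScan2]
    by_cases hE : PySem.Str.isIn "EEG" (PySem.Str.upper name) = true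
    · simp only [hE, if_true]
    · simp only [hE, ih]
      cases fh with
      | some j => simp only [Option.isNone_some, Bool.false_and]; simp
      | none =>
        by_cases hH : (EEG_HINTS.any fun hint => PySem.Str.isIn hint (PySem.Str.upper name)) = true
        · simp only [Option.isNone_none, Bool.true_and, hH, if_true]; simp
        · simp only [Option.isNone_none, Bool.true_and, hH]; simp

-- ===== VERDICT (by name: the statement is the Claim_ definition above) =====
theorem select_eeg_channel_spec : Claim_equal_select_eeg_channel := by
  intro sig_names _
  unfold Spec_select_eeg_channel select_eeg_channel select_eeg_channel_alt
  rw [pvGoB_eq]
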